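-- pv_equiv track=rewrite | github.com/CL2001/Personal-Projects | FileExplorerPong.py | trajectoire1d
-- ===== SOURCE A (Python) =====
-- def trajectoire1d(current_pos, trajectoire):
--     while current_pos not in (14, 29, 44, 59, 74, 89, 104, 119, 134, 149):
--         current_pos -= 14
--         trajectoire.append(current_pos)
--         if 0 <= current_pos <= 14:
--             current_pos, nouv_trajectoire = trajectoire5d(current_pos, trajectoire)
--             trajectoire + nouv_trajectoire
--     return current_pos, trajectoire
--
-- def trajectoire5d(current_pos, trajectoire):
--     while current_pos not in (14, 29, 44, 59, 74, 89, 104, 119, 134, 149):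
--         current_pos += 16
--         trajectoire.append(current_pos)
--         if 135 <= current_pos <= 149:
--             current_pos, nouv_trajectoire = trajectoire1d(current_pos, trajectoire)
--             trajectoire + nouv_trajectoire
--     return current_pos, trajectoire
-- ===== SOURCE B (Python) =====
-- def trajectoire1d(current_pos, trajectoire):
--     # Single iterative loop with a direction flag instead of A's mutual recursion.
--     # Appends to (and returns) the same list object, like A.
--     targets = (14, 29, 44, 59, 74, 89, 104, 119, 134, 149)
--     direction = 'down'
--     while current_pos not in targets:
--         if direction == 'down':
--             current_pos -= 14
--             trajectoire.append(current_pos)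
--             if 0 <= current_pos <= 14:
--                 direction = 'up'
--         else:
--             current_pos += 16
--             trajectoire.append(current_pos)
--             if 135 <= current_pos <= 149:
--                 direction = 'down'
--     return current_pos, trajectoire
-- ===== Notes on version B (the rewrite author's own statement) =====
-- stated objective: simpler
-- what changed: Replaced A's two mutually recursive functions (one stack frame per bounce) by a single flat while-loop with a direction flag, dropping the dead 'trajectoire + nouv_trajectoire' expression.
import Mathlib
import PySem

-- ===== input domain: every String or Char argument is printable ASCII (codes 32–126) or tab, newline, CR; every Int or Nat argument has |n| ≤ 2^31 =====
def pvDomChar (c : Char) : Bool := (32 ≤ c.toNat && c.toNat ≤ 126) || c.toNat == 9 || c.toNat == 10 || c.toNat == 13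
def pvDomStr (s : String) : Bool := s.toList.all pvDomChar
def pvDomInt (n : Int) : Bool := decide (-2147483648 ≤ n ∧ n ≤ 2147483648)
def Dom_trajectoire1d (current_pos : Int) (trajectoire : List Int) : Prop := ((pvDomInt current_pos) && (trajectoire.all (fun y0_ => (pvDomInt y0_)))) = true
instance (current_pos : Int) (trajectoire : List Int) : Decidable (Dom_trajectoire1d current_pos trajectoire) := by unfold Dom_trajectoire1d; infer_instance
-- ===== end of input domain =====

-- B replaces A's mutual recursion (one Python stack frame per bounce) by one flat loop
-- with a direction flag; return values proved equal (simpler, not faster).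
-- Both Pythons mutate the passed-in list identically; equality here is about the return value.

-- ===== PORT A =====
-- the tuple (14, 29, ..., 149) of A's two 'not in' tests
def pvTargetsA : List Int := [14, 29, 44, 59, 74, 89, 104, 119, 134, 149]

def pvInTargetsA (p : Int) : Bool := pvTargetsA.contains p

-- A's two mutually recursive while-loops, made total with a fuel counter that is
-- decremented once per loop iteration (per append).  The returned Bool is the
-- totality device's bookkeeping: true = the loop stopped on a target, false = the
-- fuel ran out mid-loop (then the current state is returned and the caller's loop,
-- whose budget is the same counter, does not resume).  On every input on which the
-- Python terminates (current_pos ≥ 14; within Dom) the fuel current_pos.natAbs + 1000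
-- is never exhausted, so this computes exactly what Python's trajectoire1d computes
-- there; for current_pos < 14 both Pythons loop forever and the ports agree trivially.
mutual
  def pvTrajD : Nat → Int → List Int → Bool × Int × List Int
    | fuel, p, tr =>
      if pvInTargetsA p then (true, p, tr)
      else
        match fuel with
        | 0 => (false, p, tr)
        | n + 1 =>
          let p' := p - 14
          let tr' := tr ++ [p']
          if 0 ≤ p' ∧ p' ≤ 14 then
            let r := pvTrajU n p' tr'
            if r.1 then pvTrajD n r.2.1 r.2.2 else r
          else
            pvTrajD n p' tr'
  def pvTrajU : Nat → Int → List Int → Bool × Int × List Int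
    | fuel, p, tr =>
      if pvInTargetsA p then (true, p, tr)
      else
        match fuel with
        | 0 => (false, p, tr)
        | n + 1 =>
          let p' := p + 16
          let tr' := tr ++ [p']
          if 135 ≤ p' ∧ p' ≤ 149 then
            let r := pvTrajD n p' tr'
            if r.1 then pvTrajU n r.2.1 r.2.2 else r
          else
            pvTrajU n p' tr'
end

def trajectoire1d (current_pos : Int) (trajectoire : List Int) : Int × List Int :=
  (pvTrajD (current_pos.natAbs + 1000) current_pos trajectoire).2

-- ===== PORT B =====
-- B's 'targets' tuple
def pvTargetsB : List Int := [14, 29, 44, 59, 74, 89, 104, 119, 134, 149]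

def pvInTargetsB (p : Int) : Bool := pvTargetsB.contains p

-- B's single while-loop; dir = true encodes direction == 'down', false encodes 'up'.
-- Same fuel device as in port A: one unit per iteration (per append).
def pvLoopB : Nat → Bool → Int → List Int → Int × List Int
  | fuel, dir, p, tr =>
    if pvInTargetsB p then (p, tr)
    else
      match fuel with
      | 0 => (p, tr)
      | n + 1 =>
        if dir then
          let p' := p - 14
          pvLoopB n (if 0 ≤ p' ∧ p' ≤ 14 then false else true) p' (tr ++ [p'])
        else
          let p' := p + 16
          pvLoopB n (if 135 ≤ p' ∧ p' ≤ 149 then true else false) p' (tr ++ [p'])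

def trajectoire1d_alt (current_pos : Int) (trajectoire : List Int) : Int × List Int :=
  pvLoopB (current_pos.natAbs + 1000) true current_pos trajectoire

-- ===== PRECONDITION & SPEC =====
def Spec_trajectoire1d (current_pos : Int) (trajectoire : List Int) (out : Int × List Int) : Prop := out = trajectoire1d_alt current_pos trajectoire
instance (current_pos : Int) (trajectoire : List Int) (out : Int × List Int) : Decidable (Spec_trajectoire1d current_pos trajectoire out) := by unfold Spec_trajectoire1d; infer_instance

-- ===== CLAIM (what is proved, stated in full; the proofs are below) =====
def Claim_equal_trajectoire1d : Prop := ∀ (current_pos : Int) (trajectoire : List Int), Dom_trajectoire1d current_pos trajectoire → Spec_trajectoire1d current_pos trajectoire (trajectoire1d current_pos trajectoire)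

-- ===== LEMMAS AND PROOFS =====

lemma pvTargets_eq (p : Int) : pvInTargetsB p = pvInTargetsA p := rfl

-- case-by-case equation lemmas for the two ports
lemma pvTrajD_target (f : Nat) (p : Int) (tr : List Int) (h : pvInTargetsA p = true) :
    pvTrajD f p tr = (true, p, tr) := by
  rw [pvTrajD.eq_def]; simp [h]

lemma pvTrajU_target (f : Nat) (p : Int) (tr : List Int) (h : pvInTargetsA p = true) :
    pvTrajU f p tr = (true, p, tr) := by
  rw [pvTrajU.eq_def]; simp [h]

lemma pvTrajD_zero (p : Int) (tr : List Int) (h : pvInTargetsA p = false) :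
    pvTrajD 0 p tr = (false, p, tr) := by
  rw [pvTrajD.eq_def]; simp [h]

lemma pvTrajU_zero (p : Int) (tr : List Int) (h : pvInTargetsA p = false) :
    pvTrajU 0 p tr = (false, p, tr) := by
  rw [pvTrajU.eq_def]; simp [h]

lemma pvTrajD_succ (n : Nat) (p : Int) (tr : List Int) (h : pvInTargetsA p = false) :
    pvTrajD (n + 1) p tr =
      (if 0 ≤ p - 14 ∧ p - 14 ≤ 14 then
        (let r := pvTrajU n (p - 14) (tr ++ [p - 14]);
         if r.1 then pvTrajD n r.2.1 r.2.2 else r)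
      else pvTrajD n (p - 14) (tr ++ [p - 14])) := by
  rw [pvTrajD.eq_def]; simp [h]

lemma pvTrajU_succ (n : Nat) (p : Int) (tr : List Int) (h : pvInTargetsA p = false) :
    pvTrajU (n + 1) p tr =
      (if 135 ≤ p + 16 ∧ p + 16 ≤ 149 then
        (let r := pvTrajD n (p + 16) (tr ++ [p + 16]);
         if r.1 then pvTrajU n r.2.1 r.2.2 else r)
      else pvTrajU n (p + 16) (tr ++ [p + 16])) := by
  rw [pvTrajU.eq_def]; simp [h]

lemma pvLoopB_target (f : Nat) (d : Bool) (p : Int) (tr : List Int) (h : pvInTargetsA p = true) :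
    pvLoopB f d p tr = (p, tr) := by
  rw [pvLoopB.eq_def]; simp [pvTargets_eq, h]

lemma pvLoopB_zero (d : Bool) (p : Int) (tr : List Int) (h : pvInTargetsA p = false) :
    pvLoopB 0 d p tr = (p, tr) := by
  rw [pvLoopB.eq_def]; simp [pvTargets_eq, h]

lemma pvLoopB_succ_down (n : Nat) (p : Int) (tr : List Int) (h : pvInTargetsA p = false) :
    pvLoopB (n + 1) true p tr =
      pvLoopB n (if 0 ≤ p - 14 ∧ p - 14 ≤ 14 then false else true) (p - 14) (tr ++ [p - 14]) := by
  rw [pvLoopB.eq_def]; simp [pvTargets_eq, h]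

lemma pvLoopB_succ_up (n : Nat) (p : Int) (tr : List Int) (h : pvInTargetsA p = false) :
    pvLoopB (n + 1) false p tr =
      pvLoopB n (if 135 ≤ p + 16 ∧ p + 16 ≤ 149 then true else false) (p + 16) (tr ++ [p + 16]) := by
  rw [pvLoopB.eq_def]; simp [pvTargets_eq, h]

-- Invariant relating A's mutually recursive pair to B's flat loop, for every fuel:
-- the (position, list) part coincides with the flat loop run with the same fuel and
-- matching direction, and the flag is true exactly when the loop stopped on a target.
lemma pvTraj_eq_loop (f : Nat) : ∀ (p : Int) (tr : List Int),
    ((pvTrajD f p tr).2 = pvLoopB f true p tr ∧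
      ((pvTrajD f p tr).1 = true → pvInTargetsA (pvTrajD f p tr).2.1 = true)) ∧
    ((pvTrajU f p tr).2 = pvLoopB f false p tr ∧
      ((pvTrajU f p tr).1 = true → pvInTargetsA (pvTrajU f p tr).2.1 = true)) := by
  induction f with
  | zero =>
    intro p tr
    by_cases hT : pvInTargetsA p = true
    · simp [pvTrajD_target _ _ _ hT, pvTrajU_target _ _ _ hT, pvLoopB_target _ _ _ _ hT, hT]
    · rw [Bool.not_eq_true] at hT
      simp [pvTrajD_zero _ _ hT, pvTrajU_zero _ _ hT, pvLoopB_zero _ _ _ hT]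
  | succ n ih =>
    intro p tr
    by_cases hT : pvInTargetsA p = true
    · simp [pvTrajD_target _ _ _ hT, pvTrajU_target _ _ _ hT, pvLoopB_target _ _ _ _ hT, hT]
    rw [Bool.not_eq_true] at hT
    constructor
    · rw [pvTrajD_succ _ _ _ hT, pvLoopB_succ_down _ _ _ hT]
      by_cases hB : 0 ≤ p - 14 ∧ p - 14 ≤ 14
      · rw [if_pos hB, if_pos hB]
        obtain ⟨hU1, hU3⟩ := (ih (p - 14) (tr ++ [p - 14])).2
        set r := pvTrajU n (p - 14) (tr ++ [p - 14]) with hr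
        simp only []
        rcases hok : r.1 with _ | _
        · rw [if_neg (by simp [hok])]
          exact ⟨hU1, by simp [hok]⟩
        · have ht := hU3 hok
          rw [if_pos rfl, pvTrajD_target _ _ _ ht]
          exact ⟨by rw [← hU1], fun _ => ht⟩
      · rw [if_neg hB, if_neg hB]
        exact (ih (p - 14) (tr ++ [p - 14])).1
    · rw [pvTrajU_succ _ _ _ hT, pvLoopB_succ_up _ _ _ hT]
      by_cases hB : 135 ≤ p + 16 ∧ p + 16 ≤ 149
      · rw [if_pos hB, if_pos hB]
        obtain ⟨hU1, hU3⟩ := (ih (p + 16) (tr ++ [p + 16])).1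
        set r := pvTrajD n (p + 16) (tr ++ [p + 16]) with hr
        simp only []
        rcases hok : r.1 with _ | _
        · rw [if_neg (by simp [hok])]
          exact ⟨hU1, by simp [hok]⟩
        · have ht := hU3 hok
          rw [if_pos rfl, pvTrajU_target _ _ _ ht]
          exact ⟨by rw [← hU1], fun _ => ht⟩
      · rw [if_neg hB, if_neg hB]
        exact (ih (p + 16) (tr ++ [p + 16])).2

-- ===== VERDICT (by name: the statement is the Claim_ definition above) =====
theorem trajectoire1d_spec : Claim_equal_trajectoire1d := by
  intro current_pos trajectoire _
  unfold Spec_trajectoire1d trajectoire1d trajectoire1d_alt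
  exact ((pvTraj_eq_loop (current_pos.natAbs + 1000) current_pos trajectoire).1).1
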